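-- pv_equiv track=rewrite | github.com/wandb/wandb | wandb/sdk/internal/file_stream.py | get_consecutive_offsets
-- ===== SOURCE A (Python) =====
-- from typing import (
--     TYPE_CHECKING,
--     Any,
--     Callable,
--     Dict,
--     List,
--     NamedTuple,
--     Optional,
--     Set,
--     Tuple,
--     Type,
--     Union,
-- )
--
-- def get_consecutive_offsets(console: Dict[int, str]) -> List[List[int]]:
--     """Compress consecutive line numbers into an interval.
--
--     Args:
--         console: Dict[int, str] which maps offsets (line numbers) to lines of text.
--         It represents a mini version of our console dashboard on the UI.
--
--     Returns:
--         A list of intervals (we compress consecutive line numbers into an interval).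
--
--     Example:
--         >>> console = {2: "", 3: "", 4: "", 5: "", 10: "", 11: "", 20: ""}
--         >>> get_consecutive_offsets(console)
--         [(2, 5), (10, 11), (20, 20)]
--     """
--     offsets = sorted(list(console.keys()))
--     intervals: List = []
--     for i, num in enumerate(offsets):
--         if i == 0:
--             intervals.append([num, num])
--             continue
--         largest = intervals[-1][1]
--         if num == largest + 1:
--             intervals[-1][1] = num
--         else:
--             intervals.append([num, num])
--     return intervals
-- ===== SOURCE B (Python) =====
-- from itertools import groupby
--
--
-- def get_consecutive_offsets(console):
--     intervals = []
--     for _, group in groupby(enumerate(sorted(console.keys())), key=lambda p: p[1] - p[0]):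
--         run = [num for _, num in group]
--         intervals.append([run[0], run[-1]])
--     return intervals
-- ===== Notes on version B (the rewrite author's own statement) =====
-- stated objective: idiomatic
-- what changed: Replaced A's running-accumulator merge that mutates the last interval in place with an itertools.groupby pass over the enumerated sorted keys, keyed by num minus index, so each maximal consecutive run becomes one group whose first and last values form the interval.
import Mathlib
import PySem

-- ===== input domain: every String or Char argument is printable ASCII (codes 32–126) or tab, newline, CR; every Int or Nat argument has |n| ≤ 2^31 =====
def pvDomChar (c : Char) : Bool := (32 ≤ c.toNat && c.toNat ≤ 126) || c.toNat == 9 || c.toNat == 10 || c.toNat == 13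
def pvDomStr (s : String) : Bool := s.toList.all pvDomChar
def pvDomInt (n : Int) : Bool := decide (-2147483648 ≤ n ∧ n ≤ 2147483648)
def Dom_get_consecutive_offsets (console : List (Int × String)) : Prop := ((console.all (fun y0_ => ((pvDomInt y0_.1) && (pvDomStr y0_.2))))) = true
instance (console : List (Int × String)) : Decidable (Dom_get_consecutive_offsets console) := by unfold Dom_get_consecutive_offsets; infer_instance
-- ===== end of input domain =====

-- B replaces A's running-accumulator merge (mutating the last interval in place) with a groupby over
-- enumerate(sorted keys) keyed by num - index; same O(n log n) cost, more idiomatic (objective: idiomatic).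

-- ===== PORT A =====
-- loop body of A: i == 0 appends [num,num]; otherwise compares num with intervals[-1][1]
def pvStepA (intervals : List (List Int)) (p : Int × Int) : List (List Int) :=
  if p.1 = 0 then intervals ++ [[p.2, p.2]]
  else
    let last := (PySem.List.pyGet? intervals (-1)).getD []        -- intervals[-1] (never the default: intervals ≠ [] when i ≠ 0)
    let largest := (PySem.List.pyGet? last 1).getD 0              -- intervals[-1][1]
    if p.2 = largest + 1 then
      intervals.dropLast ++ [[(PySem.List.pyGet? last 0).getD 0, p.2]]   -- intervals[-1][1] = num (in-place on the last cell)
    else intervals ++ [[p.2, p.2]]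

def get_consecutive_offsets (console : List (Int × String)) : List (List Int) :=
  (PySem.List.enumerate (PySem.List.sorted (PySem.List.dedup (console.map Prod.fst)) (fun x => x) false) 0).foldl pvStepA []

-- ===== PORT B =====
def pvKeyB (p : Int × Int) : Int := p.2 - p.1

-- itertools.groupby on (seed :: rest) with key pvKeyB: maximal runs of equal key
def pvGroupby (x : Int × Int) : List (Int × Int) → List (List (Int × Int))
  | [] => [[x]]
  | y :: ys =>
    if pvKeyB y = pvKeyB x then
      match pvGroupby y ys with
      | [] => [[x]]                     -- unreachable: pvGroupby never returns []
      | g :: gs => (x :: g) :: gs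
    else [x] :: pvGroupby y ys

-- run = [num for _, num in group]; append [run[0], run[-1]]
def pvEndp (g : List (Int × Int)) : List Int :=
  let run := g.map (·.2)
  [(PySem.List.pyGet? run 0).getD 0, (PySem.List.pyGet? run (-1)).getD 0]

def get_consecutive_offsets_alt (console : List (Int × String)) : List (List Int) :=
  (match PySem.List.enumerate (PySem.List.sorted (PySem.List.dedup (console.map Prod.fst)) (fun x => x) false) 0 with
   | [] => []
   | x :: xs => pvGroupby x xs).map pvEndp

-- ===== PRECONDITION & SPEC =====
def Spec_get_consecutive_offsets (console : List (Int × String)) (out : List (List Int)) : Prop := out = get_consecutive_offsets_alt console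
instance (console : List (Int × String)) (out : List (List Int)) : Decidable (Spec_get_consecutive_offsets console out) := by unfold Spec_get_consecutive_offsets; infer_instance

-- ===== CLAIM (what is proved, stated in full; the proofs are below) =====
def Claim_equal_get_consecutive_offsets : Prop := ∀ (console : List (Int × String)), Dom_get_consecutive_offsets console → Spec_get_consecutive_offsets console (get_consecutive_offsets console)

-- ===== LEMMAS AND PROOFS =====

-- "modify the head interval's start": what A's open accumulator interval looks like relative to B's group
def pvMhs (a : Int) : List (List Int) → List (List Int)
  | [] => []
  | e :: es => [a, e.getLastD 0] :: es

theorem pvGroupby_shape (xs : List (Int × Int)) (x : Int × Int) :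
    ∃ t gs, pvGroupby x xs = (x :: t) :: gs := by
  induction xs generalizing x with
  | nil => exact ⟨[], [], rfl⟩
  | cons y ys ih =>
    by_cases h : pvKeyB y = pvKeyB x
    · obtain ⟨t, gs, hg⟩ := ih y
      exact ⟨y :: t, gs, by simp [pvGroupby, h, hg]⟩
    · exact ⟨[], pvGroupby y ys, by simp [pvGroupby, h]⟩

theorem pvEndp_cons_cons (x y : Int × Int) (t : List (Int × Int)) :
    pvEndp (x :: y :: t) = [x.2, ((y :: t).map (·.2)).getLastD 0] := by
  simp [pvEndp, PySem.List.pyGet?_zero_cons, PySem.List.pyGet?_neg_one,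
        List.getLastD_eq_getLast?, List.getLast?_cons_cons]

theorem pvEndp_single (x : Int × Int) : pvEndp [x] = [x.2, x.2] := by
  simp [pvEndp, PySem.List.pyGet?_neg_one]

theorem pvMhs_endp_head (a : Int) (x : Int × Int) (t : List (Int × Int)) (gs : List (List (Int × Int))) :
    pvMhs a (((x :: t) :: gs).map pvEndp) =
      [a, ((x :: t).map (·.2)).getLastD 0] :: gs.map pvEndp := by
  cases t with
  | nil => simp [pvMhs, pvEndp_single, List.getLastD]
  | cons y t' =>
    simp [pvMhs, pvEndp_cons_cons, List.getLastD_eq_getLast?, List.getLast?_cons_cons]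

theorem pvMain (ns : List Int) : ∀ (i : Int), 0 ≤ i → ∀ (prev a : Int) (pre : List (List Int)),
    (PySem.List.enumerate ns (i + 1)).foldl pvStepA (pre ++ [[a, prev]])
      = pre ++ pvMhs a ((pvGroupby (i, prev) (PySem.List.enumerate ns (i + 1))).map pvEndp) := by
  induction ns with
  | nil =>
    intro i _ prev a pre
    simp [PySem.List.enumerate_nil, pvGroupby, pvMhs, pvEndp_single, List.getLastD]
  | cons n ns ih =>
    intro i hi prev a pre
    rw [PySem.List.enumerate_cons]
    have hstep : pvStepA (pre ++ [[a, prev]]) (i + 1, n)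
        = if n = prev + 1 then pre ++ [[a, n]] else (pre ++ [[a, prev]]) ++ [[n, n]] := by
      have h0 : ¬ (i + 1 = 0) := by omega
      simp [pvStepA, h0, PySem.List.pyGet?_neg_one_append_singleton]
    by_cases h : n = prev + 1
    · -- consecutive: B merges the new pair into the current group
      have hkey : pvKeyB (i + 1, n) = pvKeyB (i, prev) := by simp [pvKeyB]; omega
      obtain ⟨t, gs, hg⟩ := pvGroupby_shape (PySem.List.enumerate ns (i + 1 + 1)) (i + 1, n)
      have hG : pvGroupby (i, prev) ((i + 1, n) :: PySem.List.enumerate ns (i + 1 + 1))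
          = ((i, prev) :: (i + 1, n) :: t) :: gs := by
        simp [pvGroupby, hkey, hg]
      rw [List.foldl_cons, hstep, if_pos h,
          ih (i + 1) (by omega) n a pre, hG, hg,
          pvMhs_endp_head, pvMhs_endp_head]
      simp [List.getLastD_eq_getLast?, List.getLast?_cons_cons]
    · -- gap: A appends a fresh interval, B starts a fresh group
      have hkey : ¬ (pvKeyB (i + 1, n) = pvKeyB (i, prev)) := by simp [pvKeyB]; omega
      have hG : pvGroupby (i, prev) ((i + 1, n) :: PySem.List.enumerate ns (i + 1 + 1))
          = [(i, prev)] :: pvGroupby (i + 1, n) (PySem.List.enumerate ns (i + 1 + 1)) := by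
        simp [pvGroupby, hkey]
      obtain ⟨t, gs, hg⟩ := pvGroupby_shape (PySem.List.enumerate ns (i + 1 + 1)) (i + 1, n)
      rw [List.foldl_cons, hstep, if_neg h,
          ih (i + 1) (by omega) n n (pre ++ [[a, prev]]), hG, hg, pvMhs_endp_head]
      cases t <;>
        simp [pvMhs, pvEndp_single, pvEndp_cons_cons, List.getLastD_eq_getLast?]

-- ===== VERDICT (by name: the statement is the Claim_ definition above) =====
theorem get_consecutive_offsets_spec : Claim_equal_get_consecutive_offsets := by
  intro console _
  unfold Spec_get_consecutive_offsets get_consecutive_offsets get_consecutive_offsets_alt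
  generalize PySem.List.sorted (PySem.List.dedup (console.map Prod.fst)) (fun x => x) false = os
  cases os with
  | nil => simp [PySem.List.enumerate_nil]
  | cons x xs =>
    rw [PySem.List.enumerate_cons]
    dsimp only
    have hfirst : pvStepA [] ((0 : Int), x) = [] ++ [[x, x]] := by simp [pvStepA]
    rw [List.foldl_cons, hfirst, pvMain xs 0 le_rfl x x []]
    obtain ⟨t, gs, hg⟩ := pvGroupby_shape (PySem.List.enumerate xs (0 + 1)) ((0 : Int), x)
    rw [hg, pvMhs_endp_head]
    cases t <;> simp [pvEndp_single, pvEndp_cons_cons, List.getLastD_eq_getLast?]
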